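-- pv_equiv track=rewrite | github.com/selfanti/assignment1-basics | cs336_basics/tokenizer.py | _split_by_space_and_word
-- ===== SOURCE A (Python) =====
-- def _split_by_space_and_word(text: str) -> list[str]:
--     """
--     按照空格与单词的组合进行分割
--     """
--     tokens = []
--     i = 0
--     while i < len(text):
--         # 如果当前字符是空格
--         if text[i].isspace():
--             # 找到空格序列的结束
--             start = i
--             while i < len(text) and text[i].isspace():
--                 i += 1
--             # 找到非空字符序列的结束
--             start_non_space = i
--             while i < len(text) and not text[i].isspace():
--                 i += 1
--             # 组合空格和非空字符
--             if start_non_space < len(text):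
--                 tokens.append(text[start:i])
--             else:
--                 # 如果文本末尾只有空格，也添加
--                 tokens.append(text[start:start_non_space])
--         else:
--             # 非空格字符，找到序列的结束
--             start = i
--             while i < len(text) and not text[i].isspace():
--                 i += 1
--             tokens.append(text[start:i])
--
--     return tokens
-- ===== SOURCE B (Python) =====
-- from itertools import groupby
--
-- def _split_by_space_and_word(text: str) -> list[str]:
--     # Pass 1: materialize contiguous runs as (is_space, chunk) pairs.
--     runs = [(k, ''.join(g)) for k, g in groupby(text, key=str.isspace)]
--     # Pass 2: merge each space run with the following word run; a trailing
--     # space run (or a word run) stands alone.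
--     tokens = []
--     j = 0
--     while j < len(runs):
--         is_space, chunk = runs[j]
--         if is_space and j + 1 < len(runs):
--             tokens.append(chunk + runs[j + 1][1])
--             j += 2
--         else:
--             tokens.append(chunk)
--             j += 1
--     return tokens
-- ===== Notes on version B (the rewrite author's own statement) =====
-- stated objective: alternative
-- what changed: Replaces A's interleaved index scan (nested while loops advancing i) by a two-pass decomposition: first materialize contiguous (is_space, chunk) runs with itertools.groupby, then a separate merge pass that joins each space run with the following run and emits other runs alone.
import Mathlib
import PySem

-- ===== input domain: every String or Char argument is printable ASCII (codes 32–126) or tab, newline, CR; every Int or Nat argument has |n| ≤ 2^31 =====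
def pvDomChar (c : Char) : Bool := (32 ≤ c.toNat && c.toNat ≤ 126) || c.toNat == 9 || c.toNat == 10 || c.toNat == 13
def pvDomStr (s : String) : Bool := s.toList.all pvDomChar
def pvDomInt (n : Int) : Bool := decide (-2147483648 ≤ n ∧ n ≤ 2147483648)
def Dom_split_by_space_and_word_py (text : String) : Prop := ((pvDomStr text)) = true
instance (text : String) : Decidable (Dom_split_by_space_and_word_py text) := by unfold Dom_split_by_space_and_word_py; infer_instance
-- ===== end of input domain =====

-- B re-implements the same tokenisation by first materialising the contiguous runs
-- (is_space, chunk) of the text and then merging each space run with the following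
-- run in a second pass, instead of A's interleaved index scan (objective: alternative decomposition).

-- ===== PORT A =====
-- the inner 'while i < len(text) and p(text[i]): i += 1' loops of A:
-- returns (characters scanned over, remaining suffix)
def pvScanA (p : Char → Bool) : List Char → List Char × List Char
  | [] => ([], [])
  | c :: cs =>
    if p c then
      let r := pvScanA p cs
      (c :: r.1, r.2)
    else ([], c :: cs)

-- facts about the inner scan, cited by pvLoopA's termination proof
theorem pvScanA_snd_length (p : Char → Bool) (cs : List Char) :
    (pvScanA p cs).2.length ≤ cs.length := by
  induction cs with
  | nil => simp [pvScanA]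
  | cons c cs ih =>
    simp only [pvScanA]
    split
    · simpa using Nat.le_succ_of_le ih
    · simp

theorem pvScanA_snd_cons_pos (p : Char → Bool) (c : Char) (cs : List Char) (h : p c = true) :
    (pvScanA p (c :: cs)).2 = (pvScanA p cs).2 := by
  simp [pvScanA, h]

-- A's outer while loop over the remaining suffix of text
def pvLoopA : List Char → List String
  | [] => []
  | c :: cs =>
    if PySem.Chars.isspace c then
      -- space branch: scan the space run, then the following non-space run
      let s1 := pvScanA PySem.Chars.isspace (c :: cs)
      let s2 := pvScanA (fun d => !PySem.Chars.isspace d) s1.2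
      if s1.2 ≠ [] then
        (s1.1 ++ s2.1).asString :: pvLoopA s2.2
      else
        s1.1.asString :: pvLoopA s2.2
    else
      -- word branch
      let s := pvScanA (fun d => !PySem.Chars.isspace d) (c :: cs)
      s.1.asString :: pvLoopA s.2
termination_by cs => cs.length
decreasing_by
  · have h : PySem.Chars.isspace c = true := by assumption
    rw [pvScanA_snd_cons_pos _ _ _ h]
    have h1 := pvScanA_snd_length PySem.Chars.isspace cs
    have h2 := pvScanA_snd_length (fun d => !PySem.Chars.isspace d)
      (pvScanA PySem.Chars.isspace cs).2
    simp only [List.length_cons]; omega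
  · have h : PySem.Chars.isspace c = true := by assumption
    rw [pvScanA_snd_cons_pos _ _ _ h]
    have h1 := pvScanA_snd_length PySem.Chars.isspace cs
    have h2 := pvScanA_snd_length (fun d => !PySem.Chars.isspace d)
      (pvScanA PySem.Chars.isspace cs).2
    simp only [List.length_cons]; omega
  · have h : ¬ PySem.Chars.isspace c = true := by assumption
    rw [pvScanA_snd_cons_pos _ _ _ (by simp [h])]
    have h1 := pvScanA_snd_length (fun d => !PySem.Chars.isspace d) cs
    simp only [List.length_cons]; omega

def split_by_space_and_word_py (text : String) : List String :=
  pvLoopA text.toList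

-- ===== PORT B =====
-- pass 1: itertools.groupby(text, key=str.isspace) materialised as (is_space, chunk) runs
def pvRuns : List Char → List (Bool × List Char)
  | [] => []
  | c :: cs =>
    let k := PySem.Chars.isspace c
    (k, c :: cs.takeWhile (fun d => PySem.Chars.isspace d == k)) ::
      pvRuns (cs.dropWhile (fun d => PySem.Chars.isspace d == k))
termination_by cs => cs.length
decreasing_by
  have := List.length_dropWhile_le (fun d => PySem.Chars.isspace d == PySem.Chars.isspace c) cs
  simp; omega

-- pass 2: the merge loop over the run list: a space run followed by another run is
-- merged with it (consuming both); otherwise the chunk is a token by itself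
def pvMerge : List (Bool × List Char) → List String
  | [] => []
  | (true, chunk) :: r2 :: rest => (chunk ++ r2.2).asString :: pvMerge rest
  | [(true, chunk)] => [chunk.asString]
  | (false, chunk) :: rest => chunk.asString :: pvMerge rest

def split_by_space_and_word_py_alt (text : String) : List String :=
  pvMerge (pvRuns text.toList)

-- ===== PRECONDITION & SPEC =====
def Spec_split_by_space_and_word_py (text : String) (out : List String) : Prop := out = split_by_space_and_word_py_alt text
instance (text : String) (out : List String) : Decidable (Spec_split_by_space_and_word_py text out) := by unfold Spec_split_by_space_and_word_py; infer_instance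

-- ===== CLAIM (what is proved, stated in full; the proofs are below) =====
def Claim_equal_split_by_space_and_word_py : Prop := ∀ (text : String), Dom_split_by_space_and_word_py text → Spec_split_by_space_and_word_py text (split_by_space_and_word_py text)

-- ===== LEMMAS AND PROOFS =====

theorem pvScanA_eq (p : Char → Bool) (cs : List Char) :
    pvScanA p cs = (cs.takeWhile p, cs.dropWhile p) := by
  induction cs with
  | nil => simp [pvScanA]
  | cons c cs ih =>
    by_cases h : p c
    · simp [pvScanA, h, ih]
    · simp [pvScanA, h]

theorem pred_true :
    (fun d => PySem.Chars.isspace d == true) = PySem.Chars.isspace := by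
  funext d; cases hd : PySem.Chars.isspace d <;> simp

theorem pred_false :
    (fun d => PySem.Chars.isspace d == false) = (fun d => !PySem.Chars.isspace d) := by
  funext d; cases hd : PySem.Chars.isspace d <;> simp

theorem head_dropWhile_false (p : Char → Bool) (cs : List Char) (d : Char) (ds : List Char)
    (h : cs.dropWhile p = d :: ds) : p d = false := by
  induction cs with
  | nil => simp [List.dropWhile] at h
  | cons c cs ih =>
    rw [List.dropWhile_cons] at h
    by_cases hp : p c
    · rw [if_pos hp] at h; exact ih h
    · rw [if_neg hp] at h
      injection h with h1 _
      subst h1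
      simpa using hp

theorem pvLoopA_eq_merge_runs : ∀ (n : ℕ) (cs : List Char), cs.length ≤ n →
    pvLoopA cs = pvMerge (pvRuns cs) := by
  intro n
  induction n with
  | zero =>
    intro cs h
    have : cs = [] := List.eq_nil_of_length_eq_zero (Nat.le_zero.mp h)
    subst this; simp [pvLoopA, pvRuns, pvMerge]
  | succ n ih =>
    intro cs hlen
    match cs with
    | [] => simp [pvLoopA, pvRuns, pvMerge]
    | c :: cs =>
      have hcs : cs.length ≤ n := by simpa using hlen
      by_cases hc : PySem.Chars.isspace c
      · -- space branch
        rw [pvLoopA, pvRuns, if_pos hc]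
        simp only [pvScanA_eq, List.takeWhile_cons, List.dropWhile_cons, hc, pred_true]
        rcases hdw : cs.dropWhile PySem.Chars.isspace with _ | ⟨d, ds⟩
        · simp [pvMerge, pvLoopA, pvRuns]
        · have hd : PySem.Chars.isspace d = false := head_dropWhile_false _ cs d ds hdw
          rw [pvRuns]
          simp only [hd, pred_false]
          rw [pvMerge]
          simp only [List.takeWhile_cons, List.dropWhile_cons, hd, Bool.not_false, ite_true,
            ne_eq, reduceCtorEq, not_false_iff]
          have hds : (List.dropWhile (fun d => !PySem.Chars.isspace d) ds).length ≤ n := by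
            have h1 := List.length_dropWhile_le (fun d => !PySem.Chars.isspace d) ds
            have h2 := List.length_dropWhile_le PySem.Chars.isspace cs
            rw [hdw] at h2; simp at h2; omega
          rw [ih _ hds]
      · -- word branch
        rw [pvLoopA, pvRuns, if_neg hc]
        have hcf : PySem.Chars.isspace c = false := by simpa using hc
        simp only [pvScanA_eq, List.takeWhile_cons, List.dropWhile_cons, hcf,
          Bool.not_false, ite_true, pred_false]
        rw [pvMerge]
        have hdrop : (cs.dropWhile (fun d => !PySem.Chars.isspace d)).length ≤ n :=
          le_trans (List.length_dropWhile_le _ _) hcs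
        rw [ih _ hdrop]

-- ===== VERDICT (by name: the statement is the Claim_ definition above) =====
theorem split_by_space_and_word_py_spec : Claim_equal_split_by_space_and_word_py := by
  intro text _
  unfold Spec_split_by_space_and_word_py split_by_space_and_word_py split_by_space_and_word_py_alt
  exact pvLoopA_eq_merge_runs text.toList.length text.toList le_rfl
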